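-- pv_equiv track=rewrite | github.com/VishalVenuBangrae/Poly | Poly.py | mul_poly
-- ===== SOURCE A (Python) =====
-- def mul_poly(xs):
--     exponent = 0
--     coeff = 0
--     result_multiplication = {}
--     operation, poly1, poly2 = xs
--     for coeff_1, exponent_1 in poly1:
--         for coeff_2, exponent_2 in poly2:
--             exponent = exponent_1 + exponent_2
--             coeff = coeff_1 * coeff_2
--             if exponent in result_multiplication:
--                 result_multiplication[exponent] = result_multiplication[exponent] + coeff
--             else:
--                 result_multiplication[exponent] = coeff
--
--     return dict_to_list_result(result_multiplication)
--
-- def dict_to_list_result(d):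
--     poly_list = [(coefficient, exponent) for exponent, coefficient in d.items()]
--     poly_list.sort(key=lambda x: x[1], reverse=True)
--     return poly_list
-- ===== SOURCE B (Python) =====
-- def mul_poly(xs):
--     # Flatten all n*m product terms, sort them by exponent descending,
--     # then merge equal exponents in one linear pass (no dict needed).
--     operation, poly1, poly2 = xs
--     terms = [(e1 + e2, c1 * c2) for c1, e1 in poly1 for c2, e2 in poly2]
--     terms.sort(key=lambda t: t[0], reverse=True)
--     out = []
--     cur = None  # open group: (exponent, accumulated coefficient)
--     for e, c in terms:
--         if cur is None:
--             cur = (e, c)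
--         elif e == cur[0]:
--             cur = (cur[0], cur[1] + c)
--         else:
--             out.append((cur[1], cur[0]))
--             cur = (e, c)
--     if cur is not None:
--         out.append((cur[1], cur[0]))
--     return out
-- ===== Notes on version B (the rewrite author's own statement) =====
-- stated objective: alternative
-- what changed: Replaces A's exponent-keyed dict accumulation followed by a sort of the dict items with a flat list of all n*m product terms sorted by exponent descending and a single linear merge pass that sums adjacent equal exponents.
import Mathlib
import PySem

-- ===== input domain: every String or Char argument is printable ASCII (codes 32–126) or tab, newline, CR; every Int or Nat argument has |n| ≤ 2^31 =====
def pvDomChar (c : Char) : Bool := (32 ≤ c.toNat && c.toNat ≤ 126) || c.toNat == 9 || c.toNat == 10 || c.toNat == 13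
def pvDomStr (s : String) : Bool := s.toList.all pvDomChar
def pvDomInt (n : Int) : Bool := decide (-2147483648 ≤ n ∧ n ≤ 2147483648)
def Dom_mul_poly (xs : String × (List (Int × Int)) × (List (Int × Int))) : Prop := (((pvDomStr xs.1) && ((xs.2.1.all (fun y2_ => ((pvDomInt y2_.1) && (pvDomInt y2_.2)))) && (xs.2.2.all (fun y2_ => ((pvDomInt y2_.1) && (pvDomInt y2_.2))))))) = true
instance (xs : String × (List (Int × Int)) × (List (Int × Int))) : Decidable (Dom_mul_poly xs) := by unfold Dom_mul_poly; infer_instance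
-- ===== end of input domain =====

-- B replaces A's exponent-keyed dict accumulation with flatten-all-products, sort by exponent
-- descending, then one linear merge pass; same return value (alternative decomposition, no speed claim).


-- ===== PORT A =====
def dict_to_list_result (d : PySem.Dict Int Int) : List (Int × Int) :=
  let poly_list := d.items.map (fun p => (p.2, p.1))
  PySem.List.sorted poly_list (fun x => x.2) true

def mul_poly (xs : String × (List (Int × Int)) × (List (Int × Int))) : List (Int × Int) :=
  let result_multiplication : PySem.Dict Int Int :=
    xs.2.1.foldl (fun d p1 =>
      xs.2.2.foldl (fun d p2 =>
        let exponent := p1.2 + p2.2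
        let coeff := p1.1 * p2.1
        if d.contains exponent then d.insert exponent (d.getD exponent 0 + coeff)
        else d.insert exponent coeff) d)
      PySem.Dict.empty
  dict_to_list_result result_multiplication

-- ===== PORT B =====
-- B's loop body: state = (emitted groups, open group as (exponent, accumulated coeff) or none)
def stepB (acc : List (Int × Int) × Option (Int × Int)) (t : Int × Int) :
    List (Int × Int) × Option (Int × Int) :=
  match acc.2 with
  | none => (acc.1, some (t.1, t.2))
  | some cur =>
    if t.1 = cur.1 then (acc.1, some (cur.1, cur.2 + t.2))
    else (acc.1 ++ [(cur.2, cur.1)], some (t.1, t.2))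

-- B's final flush: "if cur is not None: out.append((cur[1], cur[0]))"
def flushB (r : List (Int × Int) × Option (Int × Int)) : List (Int × Int) :=
  match r.2 with
  | none => r.1
  | some cur => r.1 ++ [(cur.2, cur.1)]

def mul_poly_alt (xs : String × (List (Int × Int)) × (List (Int × Int))) : List (Int × Int) :=
  let terms := xs.2.1.flatMap (fun p1 => xs.2.2.map (fun p2 => (p1.2 + p2.2, p1.1 * p2.1)))
  let sortedTerms := PySem.List.sorted terms (fun t => t.1) true
  flushB (sortedTerms.foldl stepB ([], none))

-- ===== PRECONDITION & SPEC =====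
def Spec_mul_poly (xs : String × (List (Int × Int)) × (List (Int × Int))) (out : List (Int × Int)) : Prop := out = mul_poly_alt xs
instance (xs : String × (List (Int × Int)) × (List (Int × Int))) (out : List (Int × Int)) : Decidable (Spec_mul_poly xs out) := by unfold Spec_mul_poly; infer_instance

-- ===== CLAIM (what is proved, stated in full; the proofs are below) =====
def Claim_equal_mul_poly : Prop := ∀ (xs : String × (List (Int × Int)) × (List (Int × Int))), Dom_mul_poly xs → Spec_mul_poly xs (mul_poly xs)

-- ===== LEMMAS AND PROOFS =====

-- the flat list of product terms as (exponent, coefficient) pairs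
def pvTerms (xs : String × (List (Int × Int)) × (List (Int × Int))) : List (Int × Int) :=
  xs.2.1.flatMap (fun p1 => xs.2.2.map (fun p2 => (p1.2 + p2.2, p1.1 * p2.1)))

-- total coefficient of exponent x in a term list
def sumC (l : List (Int × Int)) (x : Int) : Int :=
  ((l.filter (fun t => t.1 == x)).map (·.2)).sum

-- A's inner loop body as a function of the (exponent, coeff) term
def stepA (d : PySem.Dict Int Int) (t : Int × Int) : PySem.Dict Int Int :=
  if d.contains t.1 then d.insert t.1 (d.getD t.1 0 + t.2) else d.insert t.1 t.2

-- recursive form of B's merge pass: an open group (e, c) and the remaining sorted terms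
def mergeRun : List (Int × Int) → Int → Int → List (Int × Int)
  | [], e, c => [(c, e)]
  | t :: rest, e, c =>
    if t.1 = e then mergeRun rest e (c + t.2) else (c, e) :: mergeRun rest t.1 t.2

lemma stepA_eq (d : PySem.Dict Int Int) (t : Int × Int) :
    stepA d t = d.insert t.1 (d.getD t.1 0 + t.2) := by
  unfold stepA
  split_ifs with h
  · rfl
  · rw [PySem.Dict.getD_of_not_contains d 0 (by simpa using h), zero_add]

lemma stepA_funext :
    stepA = (fun (d : PySem.Dict Int Int) (t : Int × Int) => d.insert t.1 (d.getD t.1 0 + t.2)) :=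
  funext fun d => funext fun t => stepA_eq d t

lemma getD_foldl_stepA (l : List (Int × Int)) :
    ∀ (d : PySem.Dict Int Int) (x : Int),
      (l.foldl stepA d).getD x 0 = d.getD x 0 + sumC l x := by
  induction l with
  | nil => intro d x; simp [sumC]
  | cons t l ih =>
    intro d x
    rw [List.foldl_cons, ih, stepA_eq, PySem.Dict.getD_insert]
    unfold sumC
    rw [List.filter_cons]
    by_cases hx : x = t.1
    · simp [hx, add_assoc]
    · have : (t.1 == x) = false := by simpa using (Ne.symm hx)
      simp [hx, this]

lemma keys_foldl_stepA (l : List (Int × Int)) (d : PySem.Dict Int Int) :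
    (l.foldl stepA d).keys = PySem.Set.update d.keys (l.map (·.1)) := by
  rw [stepA_funext]
  exact PySem.Dict.keys_foldl_insert_key l (·.1) (fun d t => d.getD t.1 0 + t.2) d

lemma nodup_keys_foldl_stepA (l : List (Int × Int)) (d : PySem.Dict Int Int)
    (h : d.keys.Nodup) : (l.foldl stepA d).keys.Nodup := by
  rw [stepA_funext]
  exact PySem.Dict.nodup_keys_foldl_insert_key l (·.1) (fun d t => d.getD t.1 0 + t.2) d h

lemma sumC_perm {l l' : List (Int × Int)} (h : l.Perm l') (x : Int) : sumC l x = sumC l' x :=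
  ((h.filter _).map _).sum_eq

lemma sumC_cons (t : Int × Int) (l : List (Int × Int)) (x : Int) :
    sumC (t :: l) x = (if t.1 = x then t.2 else 0) + sumC l x := by
  unfold sumC
  rw [List.filter_cons]
  by_cases hx : t.1 = x
  · simp [hx]
  · simp [hx]

-- A's result in closed form: the distinct exponents (first-occurrence order), each with its
-- total coefficient, sorted by exponent descending
lemma mul_poly_eq_sorted (xs : String × (List (Int × Int)) × (List (Int × Int))) :
    mul_poly xs =
      PySem.List.sorted
        ((PySem.List.dedup ((pvTerms xs).map (·.1))).map (fun e => (sumC (pvTerms xs) e, e)))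
        (fun x => x.2) true := by
  have hflat : xs.2.1.foldl (fun d p1 =>
      xs.2.2.foldl (fun d p2 =>
        let exponent := p1.2 + p2.2
        let coeff := p1.1 * p2.1
        if d.contains exponent then d.insert exponent (d.getD exponent 0 + coeff)
        else d.insert exponent coeff) d)
      PySem.Dict.empty = (pvTerms xs).foldl stepA PySem.Dict.empty := by
    rw [pvTerms, List.foldl_flatMap]
    apply PySem.List.foldl_congr_mem
    intro d p1 _
    rw [List.foldl_map]
    rfl
  have hnd : ((pvTerms xs).foldl stepA PySem.Dict.empty).keys.Nodup :=
    nodup_keys_foldl_stepA _ _ PySem.Dict.nodup_keys_empty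
  show dict_to_list_result _ = _
  rw [hflat]
  unfold dict_to_list_result
  rw [PySem.Dict.items_eq_map_keys _ hnd 0, keys_foldl_stepA]
  simp only [PySem.Dict.keys_empty, PySem.Set.update_nil_left, List.map_map]
  congr 1
  rw [PySem.List.dedup_eq_ofList]
  apply List.map_congr_left
  intro e _
  simp [Function.comp, getD_foldl_stepA, PySem.Dict.getD_empty]

-- B's fold, flushed, is mergeRun
lemma foldl_stepB (ts : List (Int × Int)) :
    ∀ (out : List (Int × Int)) (e c : Int),
      flushB (ts.foldl stepB (out, some (e, c))) = out ++ mergeRun ts e c := by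
  induction ts with
  | nil => intro out e c; simp [flushB, mergeRun]
  | cons t ts ih =>
    intro out e c
    have hstep : stepB (out, some (e, c)) t =
        if t.1 = e then (out, some (e, c + t.2)) else (out ++ [(c, e)], some (t.1, t.2)) := rfl
    rw [List.foldl_cons, hstep]
    by_cases h : t.1 = e
    · rw [if_pos h, ih, mergeRun, if_pos h]
    · rw [if_neg h, ih, mergeRun, if_neg h, List.append_assoc, List.singleton_append]

-- the merge pass on a descending term run: strictly descending output, elements characterised
lemma mergeRun_props (ts : List (Int × Int)) :
    ∀ (e c : Int), (∀ t ∈ ts, t.1 ≤ e) → ts.Pairwise (fun a b => b.1 ≤ a.1) →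
      (mergeRun ts e c).Pairwise (fun a b => b.2 < a.2) ∧
      (∀ p : Int × Int, p ∈ mergeRun ts e c ↔
        (p.2 = e ∧ p.1 = c + sumC ts e) ∨
        (p.2 ≠ e ∧ p.2 ∈ ts.map (·.1) ∧ p.1 = sumC ts p.2)) := by
  induction ts with
  | nil =>
    intro e c _ _
    constructor
    · simp [mergeRun]
    · intro p
      simp [mergeRun, sumC, Prod.ext_iff, And.comm]
  | cons t ts ih =>
    intro e c hle hpw
    have hts_le_t : ∀ u ∈ ts, u.1 ≤ t.1 := fun u hu => (List.pairwise_cons.mp hpw).1 u hu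
    have hts_pw : ts.Pairwise (fun a b => b.1 ≤ a.1) := (List.pairwise_cons.mp hpw).2
    by_cases h : t.1 = e
    · have hle' : ∀ u ∈ ts, u.1 ≤ e := fun u hu => h ▸ hts_le_t u hu
      obtain ⟨ihpw, ihmem⟩ := ih e (c + t.2) hle' hts_pw
      rw [mergeRun, if_pos h]
      refine ⟨ihpw, fun p => ?_⟩
      rw [ihmem]
      constructor
      · rintro (⟨h2, h1⟩ | ⟨h2, hm, h1⟩)
        · exact Or.inl ⟨h2, by rw [h1, sumC_cons, if_pos h]; ring⟩
        · refine Or.inr ⟨h2, by simp [hm], ?_⟩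
          rw [h1, sumC_cons, if_neg (fun hx : t.1 = p.2 => h2 (hx ▸ h)), zero_add]
      · rintro (⟨h2, h1⟩ | ⟨h2, hm, h1⟩)
        · refine Or.inl ⟨h2, ?_⟩
          rw [h1, sumC_cons, if_pos h]; ring
        · have hm' : p.2 ∈ ts.map (·.1) := by
            rcases List.mem_cons.mp hm with h' | h'
            · exact absurd (h' ▸ h) h2
            · exact h'
          refine Or.inr ⟨h2, hm', ?_⟩
          rw [h1, sumC_cons, if_neg (fun hx : t.1 = p.2 => h2 (hx ▸ h)), zero_add]
    · have hlt : t.1 < e := lt_of_le_of_ne (hle t List.mem_cons_self) h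
      obtain ⟨ihpw, ihmem⟩ := ih t.1 t.2 hts_le_t hts_pw
      rw [mergeRun, if_neg h]
      have hbound : ∀ q ∈ mergeRun ts t.1 t.2, q.2 < e := by
        intro q hq
        rcases (ihmem q).mp hq with ⟨h2, _⟩ | ⟨_, hm, _⟩
        · exact h2 ▸ hlt
        · obtain ⟨u, hu, hu2⟩ := List.mem_map.mp hm
          exact lt_of_le_of_lt (hu2 ▸ hts_le_t u hu) hlt
      have he_not_ts : e ∉ ts.map (·.1) := by
        intro hc
        obtain ⟨u, hu, hu2⟩ := List.mem_map.mp hc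
        exact absurd (hu2 ▸ hts_le_t u hu) (not_le.mpr hlt)
      have hsum_e : sumC (t :: ts) e = 0 := by
        rw [sumC_cons, if_neg h, zero_add]
        unfold sumC
        rw [List.filter_eq_nil_iff.mpr, List.map_nil, List.sum_nil]
        intro u hu
        simp only [beq_iff_eq]
        intro hue
        exact he_not_ts (List.mem_map.mpr ⟨u, hu, hue⟩)
      constructor
      · exact List.pairwise_cons.mpr ⟨hbound, ihpw⟩
      · intro p
        rw [List.mem_cons, ihmem]
        constructor
        · rintro (hp | ⟨h2, h1⟩ | ⟨h2, hm, h1⟩)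
          · rw [hp]
            exact Or.inl ⟨rfl, by rw [hsum_e]; ring⟩
          · refine Or.inr ⟨fun he => h (h2 ▸ he), by simp [h2], ?_⟩
            rw [h1, h2, sumC_cons, if_pos rfl]
          · have hplt : p.2 < e := hbound p ((ihmem p).mpr (Or.inr ⟨h2, hm, h1⟩))
            refine Or.inr ⟨ne_of_lt hplt, by simp [hm], ?_⟩
            rw [h1, sumC_cons, if_neg (fun hx => h2 hx.symm), zero_add]
        · rintro (⟨h2, h1⟩ | ⟨h2, hm, h1⟩)
          · left
            have : p.1 = c := by rw [h1, hsum_e]; ring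
            exact Prod.ext_iff.mpr ⟨this, h2⟩
          · by_cases hpt : p.2 = t.1
            · right; left
              refine ⟨hpt, ?_⟩
              rw [h1, sumC_cons, if_pos hpt.symm, hpt]
            · right; right
              have h' : p.2 ∈ ts.map (·.1) := by
                rcases List.mem_cons.mp hm with h' | h'
                · exact absurd h' hpt
                · exact h'
              exact ⟨hpt, h', by rw [h1, sumC_cons, if_neg (fun hx => hpt hx.symm), zero_add]⟩

-- ===== VERDICT (by name: the statement is the Claim_ definition above) =====
theorem mul_poly_spec : Claim_equal_mul_poly := by
  intro xs _
  show mul_poly xs = mul_poly_alt xs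
  rw [mul_poly_eq_sorted]
  have halt : mul_poly_alt xs =
      flushB ((PySem.List.sorted (pvTerms xs) (fun t => t.1) true).foldl stepB ([], none)) := rfl
  cases hst : PySem.List.sorted (pvTerms xs) (fun t => t.1) true with
  | nil =>
    have hterms : pvTerms xs = [] := (PySem.List.sorted_eq_nil_iff _ _ _).mp hst
    rw [halt, hst, hterms]
    rfl
  | cons t rest =>
    have h1 : mul_poly_alt xs = mergeRun rest t.1 t.2 := by
      rw [halt, hst, List.foldl_cons]
      have hs0 : stepB ([], none) t = ([], some (t.1, t.2)) := rfl
      rw [hs0, foldl_stepB, List.nil_append]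
    rw [h1]
    have hperm : (t :: rest).Perm (pvTerms xs) := by
      have := PySem.List.sorted_perm (pvTerms xs) (fun t => t.1) true
      rwa [hst] at this
    have hpw : (t :: rest).Pairwise (fun a b => b.1 ≤ a.1) := by
      have := PySem.List.sorted_pairwise_rev (pvTerms xs) (fun t => t.1)
      rwa [hst] at this
    obtain ⟨hhd, htl⟩ := List.pairwise_cons.mp hpw
    obtain ⟨mpw, mmem⟩ := mergeRun_props rest t.1 t.2 hhd htl
    apply PySem.List.sorted_rev_eq_of_perm_of_pairwise_gt
    · -- the merged run is a permutation of A's dedup-and-total map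
      have ndM : (mergeRun rest t.1 t.2).Nodup :=
        mpw.imp (fun {a b} hlt heq => absurd hlt (by rw [heq]; exact lt_irrefl _))
      have ndE : ((PySem.List.dedup ((pvTerms xs).map (·.1))).map
          (fun e => (sumC (pvTerms xs) e, e))).Nodup := by
        refine (PySem.List.nodup_dedup _).map ?_
        intro a b hab
        exact congrArg Prod.snd hab
      refine (List.perm_ext_iff_of_nodup ndM ndE).mpr ?_
      intro p
      rw [mmem p]
      have hmemE : p ∈ ((PySem.List.dedup ((pvTerms xs).map (·.1))).map
          (fun e => (sumC (pvTerms xs) e, e))) ↔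
          (p.2 ∈ (pvTerms xs).map (·.1) ∧ p.1 = sumC (pvTerms xs) p.2) := by
        simp only [List.mem_map, PySem.List.mem_dedup]
        constructor
        · rintro ⟨e, he, hep⟩
          have h2 : p.2 = e := (congrArg Prod.snd hep).symm
          exact ⟨h2 ▸ he, by rw [h2]; exact (congrArg Prod.fst hep).symm⟩
        · rintro ⟨hm, hs⟩
          exact ⟨p.2, hm, by rw [← hs]⟩
      rw [hmemE]
      have hsum : ∀ x, sumC (pvTerms xs) x = sumC (t :: rest) x :=
        fun x => sumC_perm hperm.symm x
      have hmm : ∀ x : Int, x ∈ (pvTerms xs).map (·.1) ↔ x ∈ (t :: rest).map (·.1) :=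
        fun x => (hperm.map (·.1)).symm.mem_iff
      constructor
      · rintro (⟨h2, h1⟩ | ⟨h2, hm, h1⟩)
        · refine ⟨(hmm p.2).mpr (by rw [h2]; exact List.mem_cons_self), ?_⟩
          rw [hsum, h2, sumC_cons, if_pos rfl, h1]
        · refine ⟨(hmm p.2).mpr (by simp [hm]), ?_⟩
          rw [hsum, sumC_cons, if_neg (fun hx => h2 hx.symm), zero_add, h1]
      · rintro ⟨hm, hs⟩
        rw [hsum, sumC_cons] at hs
        by_cases hpt : p.2 = t.1
        · exact Or.inl ⟨hpt, by rw [hs, if_pos hpt.symm, hpt]⟩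
        · have h' : p.2 ∈ rest.map (·.1) := by
            rcases List.mem_cons.mp ((hmm p.2).mp hm) with h' | h'
            · exact absurd h' hpt
            · exact h'
          exact Or.inr ⟨hpt, h', by rw [hs, if_neg (fun hx => hpt hx.symm), zero_add]⟩
    · exact mpw
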